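-- pv_equiv track=rewrite | github.com/argeanima/electron-counting2 | source/Optimizado_metales_completo.py | detecta_enl_coord
-- ===== SOURCE A (Python) =====
-- def detecta_enl_coord(cargas):
--
--     pares = []
--
--     for i in range(len(cargas)):
--         for j in range(i+1,len(cargas)):
--             if (cargas[i]==1 and cargas[j] == -1):
--                 pares.append([i,j])
--             elif (cargas[i]==-1 and cargas[j] == 1):
--                 pares.append([i,j])
--
--     return pares
-- ===== SOURCE B (Python) =====
-- def detecta_enl_coord(cargas):
--     # One right-to-left pass: remember positions of +1/-1 seen to the right,
--     # emit each index's block of partners; O(n + #pairs) instead of O(n^2).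
--     plus = []   # indices holding +1 to the right of the cursor (descending)
--     minus = []  # indices holding -1 to the right of the cursor (descending)
--     blocks = []
--     for i in range(len(cargas) - 1, -1, -1):
--         c = cargas[i]
--         if c == 1:
--             blocks.append([[i, j] for j in reversed(minus)])
--             plus.append(i)
--         elif c == -1:
--             blocks.append([[i, j] for j in reversed(plus)])
--             minus.append(i)
--     pares = []
--     for blk in reversed(blocks):
--         pares += blk
--     return pares
-- ===== Notes on version B (the rewrite author's own statement) =====
-- stated objective: faster
-- what changed: Replaces the all-pairs double loop with a single right-to-left pass that keeps the positions of +1 and -1 seen so far and emits each index's partner block directly, so work is proportional to the output instead of n^2.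
import Mathlib
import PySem

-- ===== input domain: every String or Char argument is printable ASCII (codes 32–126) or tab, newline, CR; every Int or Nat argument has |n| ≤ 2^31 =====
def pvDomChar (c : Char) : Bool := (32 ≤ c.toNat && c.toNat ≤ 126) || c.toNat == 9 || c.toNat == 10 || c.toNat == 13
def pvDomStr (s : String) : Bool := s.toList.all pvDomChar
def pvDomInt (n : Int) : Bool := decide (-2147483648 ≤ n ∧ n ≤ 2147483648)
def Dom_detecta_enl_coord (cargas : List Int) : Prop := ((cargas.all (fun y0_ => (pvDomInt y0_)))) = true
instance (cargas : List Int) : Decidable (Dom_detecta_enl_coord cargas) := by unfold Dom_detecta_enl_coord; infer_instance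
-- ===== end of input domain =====

-- B replaces A's all-pairs double loop by one right-to-left pass that remembers the positions of
-- +1/-1 seen so far and emits each index's partner block directly.

-- ===== PORT A =====
def detecta_enl_coord (cargas : List Int) : List (List Int) :=
  (PySem.List.pyRange 0 (cargas.length : Int) 1).foldl (fun pares i =>
    (PySem.List.pyRange (i + 1) (cargas.length : Int) 1).foldl (fun pares j =>
      if PySem.List.pyGetD cargas i 0 = 1 ∧ PySem.List.pyGetD cargas j 0 = -1 then pares ++ [[i, j]]
      else if PySem.List.pyGetD cargas i 0 = -1 ∧ PySem.List.pyGetD cargas j 0 = 1 then pares ++ [[i, j]]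
      else pares) pares) []

-- ===== PORT B =====
-- Source B's loop 'for i in range(len(cargas)-1, -1, -1)': recursion that processes the tail
-- (the larger indices) first; state = (plus, minus, blocks), each appended at the back as in Source B
def pvAltGo (i : Int) : List Int → List Int × List Int × List (List (List Int))
  | [] => ([], [], [])
  | c :: rest =>
    let st := pvAltGo (i + 1) rest
    if c = 1 then (st.1 ++ [i], st.2.1, st.2.2 ++ [st.2.1.reverse.map (fun j => [i, j])])
    else if c = -1 then (st.1, st.2.1 ++ [i], st.2.2 ++ [st.1.reverse.map (fun j => [i, j])])
    else st

def detecta_enl_coord_alt (cargas : List Int) : List (List Int) :=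
  (pvAltGo 0 cargas).2.2.reverse.foldl (fun pares blk => pares ++ blk) []

-- ===== PRECONDITION & SPEC =====
def Spec_detecta_enl_coord (cargas : List Int) (out : List (List Int)) : Prop := out = detecta_enl_coord_alt cargas
instance (cargas : List Int) (out : List (List Int)) : Decidable (Spec_detecta_enl_coord cargas out) := by unfold Spec_detecta_enl_coord; infer_instance

-- ===== CLAIM (what is proved, stated in full; the proofs are below) =====
def Claim_equal_detecta_enl_coord : Prop := ∀ (cargas : List Int), Dom_detecta_enl_coord cargas → Spec_detecta_enl_coord cargas (detecta_enl_coord cargas)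

-- ===== LEMMAS AND PROOFS =====

-- opposite unit charges, as one Bool (A's two elif branches merged)
def pvOpp (a b : Int) : Bool := (a == 1 && b == -1) || (a == -1 && b == 1)

-- every index produced by enumerate is at least the start
theorem pvEnumGe (l : List Int) : ∀ (s : Int) (p : Int × Int), p ∈ PySem.List.enumerate l s → s ≤ p.1 := by
  induction l with
  | nil => intro s p h; simp [PySem.List.enumerate_nil] at h
  | cons x xs ih =>
    intro s p h
    rw [PySem.List.enumerate_cons] at h
    rcases List.mem_cons.mp h with h | h
    · subst h; simp
    · have := ih (s + 1) p h; omega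

-- every index produced by enumerate is below start + length
theorem pvEnumLt (l : List Int) : ∀ (s : Int) (p : Int × Int), p ∈ PySem.List.enumerate l s → p.1 < s + l.length := by
  induction l with
  | nil => intro s p h; simp [PySem.List.enumerate_nil] at h
  | cons x xs ih =>
    intro s p h
    rw [PySem.List.enumerate_cons] at h
    rcases List.mem_cons.mp h with h | h
    · subst h
      simp only [List.length_cons]
      push_cast
      omega
    · have := ih (s + 1) p h
      simp only [List.length_cons]
      push_cast at this ⊢
      omega

-- the value paired by enumerate is the element at that index
theorem pvEnumGet (l : List Int) : ∀ (s : Int) (p : Int × Int), 0 ≤ s → p ∈ PySem.List.enumerate l s →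
    PySem.List.pyGetD l (p.1 - s) 0 = p.2 := by
  induction l with
  | nil => intro s p _ h; simp [PySem.List.enumerate_nil] at h
  | cons x xs ih =>
    intro s p hs h
    rw [PySem.List.enumerate_cons] at h
    rcases List.mem_cons.mp h with h | h
    · subst h; simp [PySem.List.pyGetD_zero_cons]
    · have h1 := pvEnumGe xs (s + 1) p h
      have h2 := ih (s + 1) p (by omega) h
      have hk : p.1 - s = ((p.1 - s).toNat : Int) := by omega
      rw [hk, PySem.List.pyGetD_natCast]
      have hk' : p.1 - (s + 1) = ((p.1 - (s + 1)).toNat : Int) := by omega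
      rw [hk', PySem.List.pyGetD_natCast] at h2
      have : (p.1 - s).toNat = (p.1 - (s + 1)).toNat + 1 := by omega
      rw [this]
      simpa using h2

theorem pvAltGo_eq (l : List Int) : ∀ (i : Int),
    pvAltGo i l =
      ( (((PySem.List.enumerate l i).filter (fun p => p.2 == 1)).map (·.1)).reverse,
        (((PySem.List.enumerate l i).filter (fun p => p.2 == -1)).map (·.1)).reverse,
        (((PySem.List.enumerate l i).filter (fun p => p.2 == 1 || p.2 == -1)).map
          (fun p => ((PySem.List.enumerate l i).filter (fun q => decide (p.1 < q.1) && pvOpp p.2 q.2)).map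
            (fun q => [p.1, q.1]))).reverse ) := by
  induction l with
  | nil => intro i; simp [pvAltGo, PySem.List.enumerate_nil]
  | cons c rest ih =>
    intro i
    have hge : ∀ p ∈ PySem.List.enumerate rest (i + 1), i < p.1 := by
      intro p hp; have := pvEnumGe rest (i + 1) p hp; omega
    have hmapcong : ∀ (a : Int),
        ((PySem.List.enumerate rest (i + 1)).filter (fun p => p.2 == 1 || p.2 == -1)).map
          (fun p => ((PySem.List.enumerate rest (i + 1)).filter (fun q => decide (p.1 < q.1) && pvOpp p.2 q.2)).map
            (fun q => [p.1, q.1]))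
        = ((PySem.List.enumerate rest (i + 1)).filter (fun p => p.2 == 1 || p.2 == -1)).map
          (fun p => (((i, a) :: PySem.List.enumerate rest (i + 1)).filter (fun q => decide (p.1 < q.1) && pvOpp p.2 q.2)).map
            (fun q => [p.1, q.1])) := by
      intro a
      apply List.map_congr_left
      intro p hp
      have hpi : i < p.1 := hge p (List.mem_of_mem_filter hp)
      rw [List.filter_cons]
      simp [show ¬(p.1 < i) by omega]
    rw [PySem.List.enumerate_cons]
    simp only [pvAltGo, ih (i + 1)]
    by_cases h1 : c = 1
    · subst h1
      have hblk1 : (((i, (1:Int)) :: PySem.List.enumerate rest (i + 1)).filter (fun q => decide (i < q.1) && pvOpp 1 q.2)).map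
            (fun q => [i, q.1])
          = ((PySem.List.enumerate rest (i + 1)).filter (fun q => q.2 == -1)).map (fun q => [i, q.1]) := by
        rw [List.filter_cons]
        simp
        congr 1
        apply List.filter_congr
        intro q hq
        simp [pvOpp, hge q hq]
      rw [if_pos rfl]
      simp only [Prod.mk.injEq]
      refine ⟨?_, ?_, ?_⟩
      · simp
      · simp
      · rw [List.filter_cons]
        simp only [show (((i, (1:Int)).2 == 1 || (i, (1:Int)).2 == -1)) = true from rfl, if_true]
        rw [List.map_cons, List.reverse_cons]
        congr 1
        · rw [← hmapcong 1]
        · simp only [List.reverse_reverse, List.map_map]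
          rw [hblk1]
          rfl
    · by_cases h2 : c = -1
      · subst h2
        have hblk1 : (((i, (-1:Int)) :: PySem.List.enumerate rest (i + 1)).filter (fun q => decide (i < q.1) && pvOpp (-1) q.2)).map
              (fun q => [i, q.1])
            = ((PySem.List.enumerate rest (i + 1)).filter (fun q => q.2 == 1)).map (fun q => [i, q.1]) := by
          rw [List.filter_cons]
          simp
          congr 1
          apply List.filter_congr
          intro q hq
          simp [pvOpp, hge q hq]
        rw [if_neg (by norm_num : ¬(-1 : Int) = 1), if_pos rfl]
        simp only [Prod.mk.injEq]
        refine ⟨?_, ?_, ?_⟩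
        · simp
        · simp
        · rw [List.filter_cons]
          simp only [show (((i, (-1:Int)).2 == 1 || (i, (-1:Int)).2 == -1)) = true from rfl, if_true]
          rw [List.map_cons, List.reverse_cons]
          congr 1
          · rw [← hmapcong (-1)]
          · simp only [List.reverse_reverse, List.map_map]
            rw [hblk1]
            rfl
      · rw [if_neg h1, if_neg h2]
        simp only [Prod.mk.injEq]
        have e1 : ((c : Int) == 1) = false := by simp [h1]
        have e2 : ((c : Int) == -1) = false := by simp [h2]
        refine ⟨?_, ?_, ?_⟩
        · rw [List.filter_cons]; simp [e1]
        · rw [List.filter_cons]; simp [e2]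
        · rw [List.filter_cons]
          simp only [e1, e2, Bool.or_false, Bool.false_eq_true, if_false]
          rw [← hmapcong c]

-- g x = [] off the filter lets the filter be dropped from a flatMap
theorem pvFlatMapFilter {α β : Type} (l : List α) (p : α → Bool) (g : α → List β)
    (h : ∀ x ∈ l, p x = false → g x = []) : (l.filter p).flatMap g = l.flatMap g := by
  induction l with
  | nil => rfl
  | cons x xs ih =>
    cases hx : p x with
    | true =>
      rw [show (x :: xs).filter p = x :: xs.filter p by simp [hx]]
      rw [List.flatMap_cons, List.flatMap_cons,
        ih (fun y hy hf => h y (List.mem_cons_of_mem x hy) hf)]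
    | false =>
      rw [show (x :: xs).filter p = xs.filter p by simp [hx]]
      rw [List.flatMap_cons, h x List.mem_cons_self hx, List.nil_append,
        ih (fun y hy hf => h y (List.mem_cons_of_mem x hy) hf)]

-- B in flatMap form over the enumerated list
theorem pvB_flat (cargas : List Int) :
    detecta_enl_coord_alt cargas =
      (PySem.List.enumerate cargas 0).flatMap
        (fun p => ((PySem.List.enumerate cargas 0).filter (fun q => decide (p.1 < q.1) && pvOpp p.2 q.2)).map
          (fun q => [p.1, q.1])) := by
  unfold detecta_enl_coord_alt
  rw [pvAltGo_eq cargas 0]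
  rw [PySem.List.foldl_append_eq_flatten]
  rw [List.nil_append, List.reverse_reverse, ← List.flatMap_def]
  apply pvFlatMapFilter
  intro p _ hp
  rw [List.filter_eq_nil_iff.mpr, List.map_nil]
  intro q _
  simp only [Bool.or_eq_false_iff, beq_eq_false_iff_ne, ne_eq] at hp
  simp [pvOpp, hp.1, hp.2]

-- A in flatMap form over the index range
theorem pvA_flat (cargas : List Int) :
    detecta_enl_coord cargas =
      (PySem.List.pyRange 0 (cargas.length : Int) 1).flatMap
        (fun i => ((PySem.List.pyRange (i + 1) (cargas.length : Int) 1).filter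
            (fun j => pvOpp (PySem.List.pyGetD cargas i 0) (PySem.List.pyGetD cargas j 0))).map
          (fun j => [i, j])) := by
  unfold detecta_enl_coord
  have hfun : (fun (pares : List (List Int)) (i : Int) =>
        (PySem.List.pyRange (i + 1) (cargas.length : Int) 1).foldl (fun pares j =>
          if PySem.List.pyGetD cargas i 0 = 1 ∧ PySem.List.pyGetD cargas j 0 = -1 then pares ++ [[i, j]]
          else if PySem.List.pyGetD cargas i 0 = -1 ∧ PySem.List.pyGetD cargas j 0 = 1 then pares ++ [[i, j]]
          else pares) pares)
      = (fun (pares : List (List Int)) (i : Int) =>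
        pares ++ ((PySem.List.pyRange (i + 1) (cargas.length : Int) 1).filter
            (fun j => pvOpp (PySem.List.pyGetD cargas i 0) (PySem.List.pyGetD cargas j 0))).map
          (fun j => [i, j])) := by
    funext pares i
    have hstep : (fun (pares : List (List Int)) (j : Int) =>
          if PySem.List.pyGetD cargas i 0 = 1 ∧ PySem.List.pyGetD cargas j 0 = -1 then pares ++ [[i, j]]
          else if PySem.List.pyGetD cargas i 0 = -1 ∧ PySem.List.pyGetD cargas j 0 = 1 then pares ++ [[i, j]]
          else pares)
        = (fun (pares : List (List Int)) (j : Int) =>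
          if pvOpp (PySem.List.pyGetD cargas i 0) (PySem.List.pyGetD cargas j 0) then pares ++ [[i, j]] else pares) := by
      funext pares j
      by_cases hA : PySem.List.pyGetD cargas i 0 = 1 ∧ PySem.List.pyGetD cargas j 0 = -1
      · rw [if_pos hA, if_pos (by simp [pvOpp, hA.1, hA.2])]
      · rw [if_neg hA]
        by_cases hB : PySem.List.pyGetD cargas i 0 = -1 ∧ PySem.List.pyGetD cargas j 0 = 1
        · rw [if_pos hB, if_pos (by simp [pvOpp, hB.1, hB.2])]
        · rw [if_neg hB, if_neg ?_]
          simp only [pvOpp, Bool.or_eq_true, Bool.and_eq_true, beq_iff_eq]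
          rintro (⟨x, y⟩ | ⟨x, y⟩)
          · exact hA ⟨x, y⟩
          · exact hB ⟨x, y⟩
    rw [hstep, PySem.List.foldl_append_if]
  rw [hfun, PySem.List.foldl_append_eq_flatMap, List.nil_append]

-- ===== VERDICT (by name: the statement is the Claim_ definition above) =====
theorem detecta_enl_coord_spec : Claim_equal_detecta_enl_coord := by
  intro cargas _
  unfold Spec_detecta_enl_coord
  rw [pvA_flat, pvB_flat]
  have hfst : (PySem.List.enumerate cargas 0).map (·.1) = PySem.List.pyRange 0 (cargas.length : Int) 1 := by
    simpa using PySem.List.map_fst_enumerate cargas 0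
  rw [← hfst, List.flatMap_map]
  apply List.flatMap_congr
  intro p hp
  have h0 : (0:Int) ≤ p.1 := pvEnumGe cargas 0 p hp
  have hlt : p.1 < (cargas.length : Int) := by have := pvEnumLt cargas 0 p hp; omega
  have hcp : PySem.List.pyGetD cargas p.1 0 = p.2 := by
    have := pvEnumGet cargas 0 p (le_refl 0) hp
    simpa using this
  rw [hcp]
  -- bring B's side to a filtered index range
  have hcong : (PySem.List.enumerate cargas 0).filter (fun q => decide (p.1 < q.1) && pvOpp p.2 q.2)
      = (PySem.List.enumerate cargas 0).filter (fun q => (fun j => decide (p.1 < j) && pvOpp p.2 (PySem.List.pyGetD cargas j 0)) q.1) := by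
    apply List.filter_congr
    intro q hq
    have hcq : PySem.List.pyGetD cargas q.1 0 = q.2 := by
      have := pvEnumGet cargas 0 q (le_refl 0) hq
      simpa using this
    show (decide (p.1 < q.1) && pvOpp p.2 q.2)
        = (decide (p.1 < q.1) && pvOpp p.2 (PySem.List.pyGetD cargas q.1 0))
    rw [hcq]
  rw [hcong]
  have hmm : ((PySem.List.enumerate cargas 0).filter
        (fun q => (fun j => decide (p.1 < j) && pvOpp p.2 (PySem.List.pyGetD cargas j 0)) q.1)).map (fun q => [p.1, q.1])
      = (((PySem.List.enumerate cargas 0).map (·.1)).filter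
        (fun j => decide (p.1 < j) && pvOpp p.2 (PySem.List.pyGetD cargas j 0))).map (fun j => [p.1, j]) := by
    rw [List.filter_map, List.map_map]
    rfl
  rw [hmm, hfst]
  rw [PySem.List.pyRange_one_append 0 (p.1 + 1) (cargas.length : Int) (by omega) (by omega), List.filter_append]
  have hnil : (PySem.List.pyRange 0 (p.1 + 1) 1).filter
      (fun j => decide (p.1 < j) && pvOpp p.2 (PySem.List.pyGetD cargas j 0)) = [] := by
    apply List.filter_eq_nil_iff.mpr
    intro j hj
    have := (PySem.List.mem_pyRange_one.mp hj).2
    simp only [Bool.and_eq_true, decide_eq_true_eq]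
    rintro ⟨h, -⟩
    omega
  have htail : (PySem.List.pyRange (p.1 + 1) (cargas.length : Int) 1).filter
      (fun j => decide (p.1 < j) && pvOpp p.2 (PySem.List.pyGetD cargas j 0))
      = (PySem.List.pyRange (p.1 + 1) (cargas.length : Int) 1).filter
      (fun j => pvOpp p.2 (PySem.List.pyGetD cargas j 0)) := by
    apply List.filter_congr
    intro j hj
    have := (PySem.List.mem_pyRange_one.mp hj).1
    simp [show p.1 < j by omega]
  rw [hnil, htail, List.nil_append]
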